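-- pv_equiv track=rewrite | github.com/enicholl/Bash-Python-Webapp-Project | webform/catmice.py | cat_mouse
-- ===== SOURCE A (Python) =====
-- def cat_mouse(player_number=100):  # default number 100 if none selected by user
--     results = []  # for every number in the players range, the outcome is appended to this results list to be displayed
--     for x in range(int(player_number) + 1):  # loops over every number up to and including the users chosen number
--         prime = True
--         for p in range(2, x):  # identifies which numbers ARE NOT prime and changes boolean "prime" to false
--             if x % p == 0:
--                 prime = False
--         if (x == 1) or (x == 0):  # ensures that 0 and 1 are not included as prime numbers
--             prime = False
--             results.append("{}".format(x))
--         elif prime:  # saves prime numbers with the value dog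
--             results.append("Dog")  # adds dog to the results list
--         elif (x % 5 == 0) and (x % 3 == 0):  # saves number divisible by 5 and 3 with value cat and mouse
--             results.append("Cat and Mouse")  # adds cat and mouse to the results list
--         elif x % 3 == 0:  # saves number divisible by 3 with value cat
--             results.append("Cat")  # adds cat to the results list
--         elif x % 5 == 0:  # saves number divisible by 5 with value mouse
--             results.append("Mouse")  # adds mouse to the results list
--         else:
--             results.append("{}".format(x))  # else number itself is added to the results list
--         x += 1  # moves to the next number in the range
--
--     return results  # returns full list of results up to and including the number chosen by the user
-- ===== SOURCE B (Python) =====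
-- def cat_mouse(player_number=100):
--     # Sieve: mark every proper multiple of every p >= 2 as composite, then classify each number.
--     n = int(player_number)
--     size = n + 1
--     is_prime = [x >= 2 for x in range(size)]
--     for p in range(2, size):
--         for m in range(2 * p, size, p):
--             is_prime[m] = False
--     results = []
--     for x in range(size):
--         if is_prime[x]:
--             results.append("Dog")
--         elif x > 1 and x % 15 == 0:
--             results.append("Cat and Mouse")
--         elif x > 1 and x % 3 == 0:
--             results.append("Cat")
--         elif x > 1 and x % 5 == 0:
--             results.append("Mouse")
--         else:
--             results.append(str(x))
--     return results
-- ===== Notes on version B (the rewrite author's own statement) =====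
-- stated objective: faster
-- what changed: A decides primality of each x by trial division over all of range(2,x); B builds one sieve (marking every proper multiple of every p>=2 as composite) and then classifies each number with a single table lookup.
import Mathlib
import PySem

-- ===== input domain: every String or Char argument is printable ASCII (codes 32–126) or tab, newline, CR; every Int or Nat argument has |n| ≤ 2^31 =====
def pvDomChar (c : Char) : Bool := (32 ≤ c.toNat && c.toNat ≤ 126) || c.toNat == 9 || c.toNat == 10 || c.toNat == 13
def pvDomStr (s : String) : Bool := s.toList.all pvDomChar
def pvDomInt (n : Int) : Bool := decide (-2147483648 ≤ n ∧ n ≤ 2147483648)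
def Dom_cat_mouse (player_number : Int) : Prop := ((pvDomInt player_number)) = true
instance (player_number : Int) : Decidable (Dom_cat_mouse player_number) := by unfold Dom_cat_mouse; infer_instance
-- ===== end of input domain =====

-- B replaces A's per-number trial division with a single divisibility sieve (a timing run measures the speed label).

-- ===== PORT A =====
-- literal transliteration of A: per-number trial-division prime flag, then the branch chain
def cat_mouse (player_number : Int) : List String :=
  (PySem.List.pyRange 0 (player_number + 1) 1).foldl (fun results x =>
    let prime := (PySem.List.pyRange 2 x 1).foldl
      (fun pr p => if PySem.Int.mod x p = 0 then false else pr) true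
    if x = 1 ∨ x = 0 then results ++ [PySem.Int.toStr x]
    else if prime then results ++ ["Dog"]
    else if PySem.Int.mod x 5 = 0 ∧ PySem.Int.mod x 3 = 0 then results ++ ["Cat and Mouse"]
    else if PySem.Int.mod x 3 = 0 then results ++ ["Cat"]
    else if PySem.Int.mod x 5 = 0 then results ++ ["Mouse"]
    else results ++ [PySem.Int.toStr x]) []

-- ===== PORT B =====
-- literal transliteration of B: build the sieve, then classify each number by lookup.
-- is_prime[m] = False: m ≥ 2p ≥ 4 and m < size = length(is_prime), so List.set at m.toNat is exactly Python's assignment;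
-- is_prime[x]: x is always in range (0 ≤ x < size), so pyGetD with a default reads exactly Python's is_prime[x].
def cat_mouse_alt (player_number : Int) : List String :=
  let size := player_number + 1
  let isPrime0 := (PySem.List.pyRange 0 size 1).map (fun x => decide (2 ≤ x))
  let isPrime := (PySem.List.pyRange 2 size 1).foldl (fun arr p =>
      (PySem.List.pyRange (2*p) size p).foldl (fun arr m => arr.set m.toNat false) arr) isPrime0
  (PySem.List.pyRange 0 size 1).foldl (fun results x =>
    if PySem.List.pyGetD isPrime x false then results ++ ["Dog"]
    else if 1 < x ∧ PySem.Int.mod x 15 = 0 then results ++ ["Cat and Mouse"]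
    else if 1 < x ∧ PySem.Int.mod x 3 = 0 then results ++ ["Cat"]
    else if 1 < x ∧ PySem.Int.mod x 5 = 0 then results ++ ["Mouse"]
    else results ++ [PySem.Int.toStr x]) []

-- ===== PRECONDITION & SPEC =====
def Spec_cat_mouse (player_number : Int) (out : List String) : Prop := out = cat_mouse_alt player_number
instance (player_number : Int) (out : List String) : Decidable (Spec_cat_mouse player_number out) := by unfold Spec_cat_mouse; infer_instance

-- ===== CLAIM (what is proved, stated in full; the proofs are below) =====
def Claim_equal_cat_mouse : Prop := ∀ (player_number : Int), Dom_cat_mouse player_number → Spec_cat_mouse player_number (cat_mouse player_number)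

-- ===== LEMMAS AND PROOFS =====

-- A's trial-division loop, characterised: the flag is the conjunction over the range
lemma trial_foldl (x : Int) (l : List Int) (b : Bool) :
    l.foldl (fun pr p => if PySem.Int.mod x p = 0 then false else pr) b
      = (b && l.all (fun p => !decide (PySem.Int.mod x p = 0))) := by
  induction l generalizing b with
  | nil => simp
  | cons h t ih =>
    simp only [List.foldl_cons, List.all_cons, ih]
    by_cases hm : PySem.Int.mod x h = 0 <;> simp [hm]

lemma trial_false_iff (x : Int) :
    ((PySem.List.pyRange 2 x 1).foldl
      (fun pr p => if PySem.Int.mod x p = 0 then false else pr) true = false)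
      ↔ ∃ p : Int, 2 ≤ p ∧ p < x ∧ p ∣ x := by
  rw [trial_foldl]
  simp [PySem.List.mem_pyRange_one, PySem.Int.mod_eq_zero_iff_dvd]
  constructor
  · rintro ⟨p, ⟨h1, h2⟩, h3⟩; exact ⟨p, h1, h2, h3⟩
  · rintro ⟨p, h1, h2, h3⟩; exact ⟨p, ⟨h1, h2⟩, h3⟩

-- reading an entry after folding the markings over any list of indices
lemma markfold_getElem? (l : List Int) (arr : List Bool) (i : Nat) :
    (l.foldl (fun a m => a.set m.toNat false) arr)[i]?
      = if l.any (fun m => m.toNat == i) then arr[i]?.map (fun _ => false) else arr[i]? := by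
  induction l generalizing arr with
  | nil => simp
  | cons h t ih =>
    simp only [List.foldl_cons, List.any_cons, ih]
    by_cases hm : h.toNat = i
    · subst hm
      rcases Nat.lt_or_ge h.toNat arr.length with hlen | hlen
      · simp [hlen]
      · simp [Nat.not_lt.mpr hlen]
    · simp [hm]

-- the numbers the sieve marks are exactly those with a proper divisor ≥ 2
lemma mark_iff (n x : Int) (h0 : 0 ≤ x) (hx : x < n + 1) :
    ((PySem.List.pyRange 2 (n+1) 1).any (fun p =>
        (PySem.List.pyRange (2*p) (n+1) p).any (fun m => m.toNat == x.toNat)) = true)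
      ↔ ∃ p : Int, 2 ≤ p ∧ p < x ∧ p ∣ x := by
  simp only [List.any_eq_true, PySem.List.mem_pyRange_one, beq_iff_eq]
  constructor
  · rintro ⟨p, ⟨hp2, hpn⟩, m, hm, hmx⟩
    rw [PySem.List.mem_pyRange_iff_of_pos (by omega)] at hm
    obtain ⟨hm1, hm2, hm3⟩ := hm
    have hmx' : m = x := by omega
    subst hmx'
    have hdvd : p ∣ m := by
      have h2p : p ∣ 2 * p := ⟨2, by ring⟩
      have := dvd_add hm3 h2p
      simpa using this
    exact ⟨p, hp2, by omega, hdvd⟩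
  · rintro ⟨p, hp2, hpx, k, hk⟩
    have hk2 : 2 ≤ k := by nlinarith
    refine ⟨p, ⟨hp2, by omega⟩, x, ?_, by simp⟩
    rw [PySem.List.mem_pyRange_iff_of_pos (by omega)]
    refine ⟨by nlinarith, by omega, ?_⟩
    exact ⟨k - 2, by rw [hk]; ring⟩

-- the sieve lookup equals A's trial-division flag (guarded by 2 ≤ x)
lemma sieve_getD (n x : Int) (h0 : 0 ≤ x) (hx : x < n + 1) :
    PySem.List.pyGetD
      ((PySem.List.pyRange 2 (n+1) 1).foldl (fun arr p =>
          (PySem.List.pyRange (2*p) (n+1) p).foldl (fun arr m => arr.set m.toNat false) arr)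
        ((PySem.List.pyRange 0 (n+1) 1).map (fun x => decide (2 ≤ x)))) x false
      = (decide (2 ≤ x) &&
          (PySem.List.pyRange 2 x 1).foldl
            (fun pr p => if PySem.Int.mod x p = 0 then false else pr) true) := by
  have hflat :
      (PySem.List.pyRange 2 (n+1) 1).foldl (fun arr p =>
          (PySem.List.pyRange (2*p) (n+1) p).foldl (fun arr m => arr.set m.toNat false) arr)
        ((PySem.List.pyRange 0 (n+1) 1).map (fun x => decide (2 ≤ x)))
      = ((PySem.List.pyRange 2 (n+1) 1).flatMap (fun p => PySem.List.pyRange (2*p) (n+1) p)).foldl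
          (fun a m => a.set m.toNat false)
          ((PySem.List.pyRange 0 (n+1) 1).map (fun x => decide (2 ≤ x))) :=
    (List.foldl_flatMap).symm
  have hlen0 : ((PySem.List.pyRange 0 (n+1) 1).map (fun x => decide (2 ≤ x))).length = (n+1).toNat := by
    simp [PySem.List.length_pyRange_one]
  have hmlen : ∀ (l : List Int) (arr : List Bool),
      (l.foldl (fun (a : List Bool) m => a.set m.toNat false) arr).length = arr.length := by
    intro l
    induction l with
    | nil => intro arr; rfl
    | cons h t ih => intro arr; simp [List.foldl_cons, ih]
  have hxlt : x.toNat < (n+1).toNat := by omega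
  have hinit : ((PySem.List.pyRange 0 (n+1) 1).map (fun x => decide (2 ≤ x)))[x.toNat]?
      = some (decide (2 ≤ x)) := by
    rw [List.getElem?_map, PySem.List.getElem?_pyRange_one]
    simp only [show (n+1-0 : Int) = n+1 by ring, if_pos hxlt]
    have : (0 : Int) + (x.toNat : Int) = x := by omega
    rw [this]
    rfl
  rw [hflat]
  rw [PySem.List.pyGetD_eq_getElem _ _ h0 (by rw [hmlen, hlen0]; omega)]
  have hget := markfold_getElem?
    ((PySem.List.pyRange 2 (n+1) 1).flatMap (fun p => PySem.List.pyRange (2*p) (n+1) p))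
    ((PySem.List.pyRange 0 (n+1) 1).map (fun x => decide (2 ≤ x))) x.toNat
  rw [List.any_flatMap] at hget
  rw [List.getElem?_eq_getElem (by rw [hmlen, hlen0]; exact hxlt)] at hget
  by_cases hcond : ((PySem.List.pyRange 2 (n+1) 1).any (fun p =>
        (PySem.List.pyRange (2*p) (n+1) p).any (fun m => m.toNat == x.toNat)) = true)
  · rw [if_pos hcond, hinit] at hget
    have hdiv : ∃ p : Int, 2 ≤ p ∧ p < x ∧ p ∣ x := (mark_iff n x h0 hx).mp hcond
    rw [(trial_false_iff x).mpr hdiv]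
    simp only [Option.map_some] at hget
    simp only [Option.some.injEq] at hget
    simp [hget]
  · rw [if_neg hcond, hinit] at hget
    have hnodiv : ¬ ∃ p : Int, 2 ≤ p ∧ p < x ∧ p ∣ x := fun h => hcond ((mark_iff n x h0 hx).mpr h)
    have htf : (PySem.List.pyRange 2 x 1).foldl
        (fun pr p => if PySem.Int.mod x p = 0 then false else pr) true = true :=
      Bool.of_not_eq_false (fun h => hnodiv ((trial_false_iff x).mp h))
    rw [htf]
    simp only [Option.some.injEq] at hget
    simp [hget]

-- ===== VERDICT (by name: the statement is the Claim_ definition above) =====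
theorem cat_mouse_spec : Claim_equal_cat_mouse := by
  intro n _
  unfold Spec_cat_mouse cat_mouse cat_mouse_alt
  simp only []
  apply (PySem.List.foldl_congr_mem _ _ _ _ _).symm
  intro acc x hx
  rw [PySem.List.mem_pyRange_one] at hx
  obtain ⟨hx0, hxn⟩ := hx
  rw [sieve_getD n x hx0 hxn]
  by_cases h2 : 2 ≤ x
  · rw [if_neg (by omega : ¬(x = 1 ∨ x = 0)), (by simp [h2] : decide (2 ≤ x) = true), Bool.true_and]
    cases htr : (PySem.List.pyRange 2 x 1).foldl
        (fun pr p => if PySem.Int.mod x p = 0 then false else pr) true with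
    | true => simp
    | false =>
      simp only [if_neg (Bool.false_ne_true), PySem.Int.mod_eq_zero_iff_dvd]
      have h15 : (1 < x ∧ (15:Int) ∣ x) ↔ ((5:Int) ∣ x ∧ (3:Int) ∣ x) := by
        constructor
        · rintro ⟨-, h⟩; omega
        · rintro ⟨h5, h3⟩; exact ⟨by omega, by omega⟩
      have h3' : (1 < x ∧ (3:Int) ∣ x) ↔ ((3:Int) ∣ x) := by
        constructor
        · exact fun h => h.2
        · exact fun h => ⟨by omega, h⟩
      have h5' : (1 < x ∧ (5:Int) ∣ x) ↔ ((5:Int) ∣ x) := by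
        constructor
        · exact fun h => h.2
        · exact fun h => ⟨by omega, h⟩
      rw [if_congr h15 rfl rfl, if_congr h3' rfl rfl, if_congr h5' rfl rfl]
  · rw [if_pos (by omega : x = 1 ∨ x = 0), (by simp [h2] : decide (2 ≤ x) = false), Bool.false_and]
    rw [if_neg (Bool.false_ne_true)]
    rw [if_neg (fun h : 1 < x ∧ _ => h2 (by omega)),
        if_neg (fun h : 1 < x ∧ _ => h2 (by omega)),
        if_neg (fun h : 1 < x ∧ _ => h2 (by omega))]
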